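-- pv_equiv track=rewrite | github.com/suru003/DSA-Leetcode-Python3 | Tree/Maximum Score After Applying Operations on a Tree/Solution.py | maximumScoreAfterOperations
-- ===== SOURCE A (Python) =====
-- from typing import List
-- from collections import defaultdict
--
-- def maximumScoreAfterOperations(edges: List[List[int]], values: List[int]) -> int:
--     tree = defaultdict(list)
--
--     for a, b in edges:
--         tree[a].append(b)
--         tree[b].append(a)
--
--     def recurse(cur, parent):
--         if len(tree[cur]) == 1 and tree[cur][0] == parent:
--             return values[cur]
--
--         total_min = 0
--         for child in tree[cur]:
--             if child != parent:
--                 total_min += recurse(child, cur)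
--
--         return min(total_min, values[cur])
--
--     total = sum(values)
--     return total - recurse(0, -1)
-- ===== SOURCE B (Python) =====
-- from typing import List
-- from collections import defaultdict
--
-- def maximumScoreAfterOperations(edges: List[List[int]], values: List[int]) -> int:
--     # Dual DP: for each subtree return (its value sum, the maximum score keepable
--     # while every leaf-to-root path keeps at least one zeroed node); the minimum
--     # forced loss in the root's component is then s - best, and the answer is the
--     # grand total minus that loss.
--     tree = defaultdict(list)
--     for a, b in edges:
--         tree[a].append(b)
--         tree[b].append(a)
--
--     def dfs(cur, parent):
--         if tree[cur] == [parent]: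
--             return values[cur], 0
--         s_children = 0
--         best_children = 0
--         for child in tree[cur]:
--             if child != parent:
--                 s, best = dfs(child, cur)
--                 s_children += s
--                 best_children += best
--         return values[cur] + s_children, max(s_children, values[cur] + best_children)
--
--     s, best = dfs(0, -1)
--     return sum(values) - (s - best)
-- ===== Notes on version B (the rewrite author's own statement) =====
-- stated objective: alternative
-- what changed: Replaces A's single-value min-cost DP (minimum value that must be zeroed on every leaf path) with the dual DP returning per subtree the pair (value sum, maximum keepable score) combined with max, recovering A's answer as total minus (sum - best).
import Mathlib
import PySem

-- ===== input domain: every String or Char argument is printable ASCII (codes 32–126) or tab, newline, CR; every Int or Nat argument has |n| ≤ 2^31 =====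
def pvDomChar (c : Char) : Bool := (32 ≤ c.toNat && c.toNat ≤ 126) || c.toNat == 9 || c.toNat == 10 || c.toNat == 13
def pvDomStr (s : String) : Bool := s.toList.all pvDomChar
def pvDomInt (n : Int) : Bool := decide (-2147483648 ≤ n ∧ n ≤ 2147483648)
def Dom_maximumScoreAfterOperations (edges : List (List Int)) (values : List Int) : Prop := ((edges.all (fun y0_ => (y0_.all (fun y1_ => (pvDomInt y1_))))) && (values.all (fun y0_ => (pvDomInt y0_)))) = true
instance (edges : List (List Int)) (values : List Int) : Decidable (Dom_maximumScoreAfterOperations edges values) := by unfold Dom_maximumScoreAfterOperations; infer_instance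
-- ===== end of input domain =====

-- B replaces A's min-cost DP by the dual (subtree-sum, max-keepable-score) DP; objective: alternative.

-- ===== PORT A =====
-- adjacency dict built exactly as A's defaultdict loop
def pvTreeA (edges : List (List Int)) : PySem.Dict Int (List Int) :=
  edges.foldl (fun t e =>
    match e with
    | [a, b] =>
        let t := t.insert a (t.getD a [] ++ [b])
        t.insert b (t.getD b [] ++ [a])
    | _ => t) PySem.Dict.empty

-- A's `recurse`, with fuel for totality (the Python recursion is unbounded;
-- inside Pre_ the depth is bounded by the fuel passed at the top level)
def pvRecA (tree : PySem.Dict Int (List Int)) (values : List Int) :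
    Nat → Int → Int → Int
  | 0, _, _ => 0
  | Nat.succ f, cur, parent =>
    let nbrs := tree.getD cur []
    if nbrs.length = 1 ∧ PySem.List.pyGet? nbrs 0 = some parent then
      (PySem.List.pyGet? values cur).getD 0
    else
      let totalMin := nbrs.foldl
        (fun acc c => if c ≠ parent then acc + pvRecA tree values f c cur else acc) 0
      min totalMin ((PySem.List.pyGet? values cur).getD 0)

def maximumScoreAfterOperations (edges : List (List Int)) (values : List Int) : Int :=
  let tree := pvTreeA edges
  let total := values.foldl (· + ·) 0
  total - pvRecA tree values (edges.length + values.length + 2) 0 (-1)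

-- ===== PORT B =====
-- B builds the same defaultdict adjacency
def pvTreeB (edges : List (List Int)) : PySem.Dict Int (List Int) :=
  edges.foldl (fun t e =>
    match e with
    | [a, b] =>
        let t := t.insert a (t.getD a [] ++ [b])
        t.insert b (t.getD b [] ++ [a])
    | _ => t) PySem.Dict.empty

-- B's `dfs`: returns (subtree value sum, max keepable score); same fuel discipline
def pvRecB (tree : PySem.Dict Int (List Int)) (values : List Int) :
    Nat → Int → Int → Int × Int
  | 0, _, _ => (0, 0)
  | Nat.succ f, cur, parent =>
    let nbrs := tree.getD cur []
    if nbrs = [parent] then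
      ((PySem.List.pyGet? values cur).getD 0, 0)
    else
      let p := nbrs.foldl
        (fun (p : Int × Int) c =>
          if c ≠ parent then
            let r := pvRecB tree values f c cur
            (p.1 + r.1, p.2 + r.2)
          else p) (0, 0)
      let v := (PySem.List.pyGet? values cur).getD 0
      (v + p.1, max p.1 (v + p.2))

def maximumScoreAfterOperations_alt (edges : List (List Int)) (values : List Int) : Int :=
  let tree := pvTreeB edges
  let r := pvRecB tree values (edges.length + values.length + 2) 0 (-1)
  (values.foldl (· + ·) 0) - (r.1 - r.2)

-- ===== PRECONDITION & SPEC =====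
-- helpers for Pre_: the connected component of node 0 and its simple edge set
def pvCompStep (edges : List (List Int)) (S : List Int) : List Int :=
  edges.foldl (fun S e =>
    match e with
    | [a, b] => if a ∈ S ∨ b ∈ S then PySem.Set.add (PySem.Set.add S a) b else S
    | _ => S) S

def pvComp (edges : List (List Int)) : List Int :=
  Nat.iterate (pvCompStep edges) (2 * edges.length + 1) [0]

def pvSimpleEdges (edges : List (List Int)) (S : List Int) : List (Int × Int) :=
  edges.foldl (fun acc e =>
    match e with
    | [a, b] => if a ∈ S ∧ a ≠ b then PySem.Set.add acc (min a b, max a b) else acc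
    | _ => acc) []

-- Pre_: each edge is a length-2 pair, values is nonempty, every node in 0's
-- component is a valid (possibly negative) Python index into values, and the
-- simple graph underlying 0's component is acyclic (edge count = vertices - 1).
-- Outside Pre_ the Python A raises (unpacking/IndexError) or recurses forever.
def Pre_maximumScoreAfterOperations (edges : List (List Int)) (values : List Int) : Prop :=
  (edges.all (fun e => e.length = 2) = true) ∧
  1 ≤ values.length ∧
  (∀ v ∈ pvComp edges, -(values.length : Int) ≤ v ∧ v < (values.length : Int)) ∧
  (pvSimpleEdges edges (pvComp edges)).length = (pvComp edges).length - 1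

instance (edges : List (List Int)) (values : List Int) : Decidable (Pre_maximumScoreAfterOperations edges values) := by unfold Pre_maximumScoreAfterOperations; infer_instance

def pvWitness_maximumScoreAfterOperations : List (List Int) × List Int :=
  ([[0, 1], [0, 2]], [2, 3, 5])

def Spec_maximumScoreAfterOperations (edges : List (List Int)) (values : List Int) (out : Int) : Prop := out = maximumScoreAfterOperations_alt edges values
instance (edges : List (List Int)) (values : List Int) (out : Int) : Decidable (Spec_maximumScoreAfterOperations edges values out) := by unfold Spec_maximumScoreAfterOperations; infer_instance

-- ===== CLAIM (what is proved, stated in full; the proofs are below) =====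
def Claim_equal_maximumScoreAfterOperations : Prop := ∀ (edges : List (List Int)) (values : List Int), Dom_maximumScoreAfterOperations edges values → Pre_maximumScoreAfterOperations edges values → Spec_maximumScoreAfterOperations edges values (maximumScoreAfterOperations edges values)

-- ===== LEMMAS AND PROOFS =====

-- A's leaf test (len == 1 and first element == parent) is B's `nbrs == [parent]`
lemma pv_leaf_iff (nbrs : List Int) (parent : Int) :
    (nbrs.length = 1 ∧ PySem.List.pyGet? nbrs 0 = some parent) ↔ nbrs = [parent] := by
  cases nbrs with
  | nil => simp [PySem.List.pyGet?]
  | cons x xs =>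
    cases xs with
    | nil => simp [PySem.List.pyGet?, PySem.List.pyIdx?]
    | cons y ys => simp [PySem.List.pyGet?]

-- at every fuel, A's value is B's (sum - best)
lemma pv_rec_eq (tree : PySem.Dict Int (List Int)) (values : List Int) :
    ∀ (f : Nat) (cur parent : Int),
      pvRecA tree values f cur parent =
        (pvRecB tree values f cur parent).1 - (pvRecB tree values f cur parent).2 := by
  intro f
  induction f with
  | zero => intro cur parent; simp [pvRecA, pvRecB]
  | succ f ih =>
    intro cur parent
    rw [pvRecA, pvRecB]
    by_cases hleaf : (tree.getD cur []).length = 1 ∧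
        PySem.List.pyGet? (tree.getD cur []) 0 = some parent
    · rw [if_pos hleaf, if_pos ((pv_leaf_iff _ _).1 hleaf)]
      simp
    · rw [if_neg hleaf, if_neg (fun h => hleaf ((pv_leaf_iff _ _).2 h))]
      have hfold : ∀ (l : List Int) (a : Int) (p : Int × Int), a = p.1 - p.2 →
          l.foldl (fun acc c => if c ≠ parent then acc + pvRecA tree values f c cur else acc) a =
            (l.foldl (fun (p : Int × Int) c =>
              if c ≠ parent then
                let r := pvRecB tree values f c cur
                (p.1 + r.1, p.2 + r.2)
              else p) p).1 -
            (l.foldl (fun (p : Int × Int) c =>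
              if c ≠ parent then
                let r := pvRecB tree values f c cur
                (p.1 + r.1, p.2 + r.2)
              else p) p).2 := by
        intro l
        induction l with
        | nil => intro a p hp; simpa using hp
        | cons c cs ihl =>
          intro a p hp
          simp only [List.foldl_cons]
          by_cases hc : c ≠ parent
          · rw [if_pos hc, if_pos hc]
            exact ihl _ _ (by rw [hp, ih c cur]; ring)
          · rw [if_neg hc, if_neg hc]; exact ihl _ _ hp
      rw [hfold (tree.getD cur []) 0 (0, 0) (by norm_num)]
      set P := (tree.getD cur []).foldl
          (fun (p : Int × Int) c =>
            if c ≠ parent then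
              let r := pvRecB tree values f c cur
              (p.1 + r.1, p.2 + r.2)
            else p) ((0 : Int), (0 : Int))
      set v := (PySem.List.pyGet? values cur).getD 0
      simp only [min_def, max_def]
      split_ifs <;> omega

-- ===== VERDICT (by name: the statement is the Claim_ definition above) =====
theorem maximumScoreAfterOperations_spec : Claim_equal_maximumScoreAfterOperations := by
  intro edges values _ _
  unfold Spec_maximumScoreAfterOperations
  unfold maximumScoreAfterOperations maximumScoreAfterOperations_alt
  have htree : pvTreeB edges = pvTreeA edges := rfl
  rw [htree]
  simp only [pv_rec_eq]
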